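-- pv_equiv track=rewrite | github.com/Chrisaor/StudyPython | GeeksforGeeks/Practice/2. Basic/56.UncommonCharacters.py | uncommon_chr
-- ===== SOURCE A (Python) =====
-- def uncommon_chr(str1, str2):
--     temp = list()
--     for i in list(str1):
--         if i not in list(str2):
--             temp.append(i)
--     for j in list(str2):
--         if j not in list(str1):
--             temp.append(j)
--
--     return ''.join(sorted(set(temp)))
-- ===== SOURCE B (Python) =====
-- def uncommon_chr(str1, str2):
--     return ''.join(sorted(set(str1) ^ set(str2)))
-- ===== Notes on version B (the rewrite author's own statement) =====
-- stated objective: idiomatic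
-- what changed: Replaces the two per-character membership-scan loops (each char of one string scanned against a fresh list() of the other) by a direct set symmetric difference, then one sort-and-join.
import Mathlib
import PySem

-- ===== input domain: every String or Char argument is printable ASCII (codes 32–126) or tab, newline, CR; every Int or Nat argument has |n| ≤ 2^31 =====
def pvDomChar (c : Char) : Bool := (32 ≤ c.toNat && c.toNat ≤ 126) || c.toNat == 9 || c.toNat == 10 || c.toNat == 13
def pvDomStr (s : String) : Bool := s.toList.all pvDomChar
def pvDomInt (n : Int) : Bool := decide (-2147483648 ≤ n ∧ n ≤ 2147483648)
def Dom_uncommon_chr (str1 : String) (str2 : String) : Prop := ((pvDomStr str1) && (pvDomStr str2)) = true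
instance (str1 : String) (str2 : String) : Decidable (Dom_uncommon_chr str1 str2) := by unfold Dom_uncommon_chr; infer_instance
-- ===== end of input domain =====

-- B replaces A's per-character membership-scan loops with a set symmetric difference (idiomatic, asymptotically faster).


-- ===== PORT A =====
-- ''.join(sorted(set(temp))) over single characters is rendered as String.ofList of the
-- sorted (no key, ascending) deduplicated char list; sorting a set without a key is order-independent.
def uncommon_chr (str1 : String) (str2 : String) : String :=
  let temp : List Char :=
    str1.toList.foldl (fun acc i => if i ∉ str2.toList then acc ++ [i] else acc) []
  let temp : List Char :=
    str2.toList.foldl (fun acc j => if j ∉ str1.toList then acc ++ [j] else acc) temp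
  String.ofList (PySem.List.sorted (PySem.Set.ofList temp) (fun x => x) false)

-- ===== PORT B =====
def uncommon_chr_alt (str1 : String) (str2 : String) : String :=
  String.ofList (PySem.List.sorted
    (PySem.Set.symmDiff (PySem.Set.ofList str1.toList) (PySem.Set.ofList str2.toList))
    (fun x => x) false)

-- ===== PRECONDITION & SPEC =====
def Spec_uncommon_chr (str1 : String) (str2 : String) (out : String) : Prop := out = uncommon_chr_alt str1 str2
instance (str1 : String) (str2 : String) (out : String) : Decidable (Spec_uncommon_chr str1 str2 out) := by unfold Spec_uncommon_chr; infer_instance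

-- ===== CLAIM (what is proved, stated in full; the proofs are below) =====
def Claim_equal_uncommon_chr : Prop := ∀ (str1 : String) (str2 : String), Dom_uncommon_chr str1 str2 → Spec_uncommon_chr str1 str2 (uncommon_chr str1 str2)

-- ===== LEMMAS AND PROOFS =====

-- The two deduplicated lists are permutations: both Nodup with identical membership.
theorem pv_perm (l1 l2 : List Char) :
    (PySem.Set.ofList
      (l2.foldl (fun acc j => if j ∉ l1 then acc ++ [j] else acc)
        (l1.foldl (fun acc i => if i ∉ l2 then acc ++ [i] else acc) []))).Perm
    (PySem.Set.symmDiff (PySem.Set.ofList l1) (PySem.Set.ofList l2)) := by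
  rw [List.perm_ext_iff_of_nodup (PySem.Set.nodup_ofList _)
    (PySem.Set.nodup_symmDiff _ _ (PySem.Set.nodup_ofList _) (PySem.Set.nodup_ofList _))]
  intro x
  rw [PySem.List.foldl_append_ite_eq_filter, PySem.List.foldl_append_ite_eq_filter]
  simp [PySem.Set.mem_ofList, PySem.Set.mem_symmDiff, List.mem_filter]

-- ===== VERDICT (by name: the statement is the Claim_ definition above) =====
theorem uncommon_chr_spec : Claim_equal_uncommon_chr := by
  intro str1 str2 _
  unfold Spec_uncommon_chr uncommon_chr uncommon_chr_alt
  exact congrArg String.ofList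
    (PySem.List.sorted_eq_sorted_of_perm _ _ _ (fun a b h => h) (pv_perm _ _))
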